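-- pv_equiv track=rewrite | github.com/lara-ehr/dolly-parton-song-generator | scripts/make_corpus.py | cap_repetition
-- ===== SOURCE A (Python) =====
-- def cap_repetition(line):
--     '''
--     Cap at 3x repetition of each word per line
--     '''
--     previous_word = []
--     new_line = []
--     rep = 0
--     for i in line:
--         if previous_word != i:
--             rep = 0
--             previous_word = i
--             new_line.append(i)
--         else:
--             rep += 1
--             if rep <= 2:
--                 new_line.append(i)
--     return new_line
-- ===== SOURCE B (Python) =====
-- def cap_repetition(line):
--     '''
--     Cap at 3x repetition of each word per line
--     '''
--     out = []
--     i = 0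
--     n = len(line)
--     while i < n:
--         j = i
--         while j < n and line[j] == line[i]:
--             j += 1
--         out.extend([line[i]] * min(j - i, 3))
--         i = j
--     return out
-- ===== Notes on version B (the rewrite author's own statement) =====
-- stated objective: idiomatic
-- what changed: Replaces the previous_word/rep running state machine with a run-length decomposition: scan each maximal run of equal consecutive words and emit min(run length, 3) copies.
import Mathlib
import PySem

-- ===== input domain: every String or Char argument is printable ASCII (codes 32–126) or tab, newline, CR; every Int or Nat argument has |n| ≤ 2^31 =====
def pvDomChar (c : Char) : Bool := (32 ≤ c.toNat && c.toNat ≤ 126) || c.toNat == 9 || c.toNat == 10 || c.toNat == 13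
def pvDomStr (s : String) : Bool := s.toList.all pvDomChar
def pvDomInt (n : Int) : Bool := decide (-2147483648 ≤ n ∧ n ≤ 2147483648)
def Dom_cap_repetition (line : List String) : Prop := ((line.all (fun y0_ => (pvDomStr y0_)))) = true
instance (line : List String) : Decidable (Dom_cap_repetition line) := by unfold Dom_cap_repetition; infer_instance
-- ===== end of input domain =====

-- B replaces A's previous_word/rep state machine by a run-length decomposition
-- (scan each maximal run of equal consecutive words, emit min(run length, 3) copies);
-- same output, same O(n) cost, arguably plainer (objective: idiomatic).

-- ===== PORT A =====
-- A's loop state: (previous_word, new_line, rep). Python's previous_word starts as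
-- the list [], which compares unequal to every string, so it is ported as
-- Option String starting at none (none ≠ some i for every string i) — exact.
def capRepStep (st : Option String × List String × Int) (i : String) :
    Option String × List String × Int :=
  if st.1 ≠ some i then (some i, st.2.1 ++ [i], 0)
  else
    let rep := st.2.2 + 1
    if rep ≤ 2 then (some i, st.2.1 ++ [i], rep) else (some i, st.2.1, rep)

def cap_repetition (line : List String) : List String :=
  (line.foldl capRepStep (none, [], 0)).2.1

-- ===== PORT B =====
-- Source B's outer while loop: each iteration consumes one maximal run of equal
-- consecutive words (the inner while finds its end) and emits min(len, 3) copies.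
def cap_repetition_alt (line : List String) : List String :=
  match line with
  | [] => []
  | x :: xs =>
      let k := (xs.takeWhile (· == x)).length + 1
      List.replicate (min k 3) x ++ cap_repetition_alt (xs.dropWhile (· == x))
termination_by line.length
decreasing_by
  simpa using Nat.lt_succ_of_le (List.length_dropWhile_le (· == x) xs)

-- ===== PRECONDITION & SPEC =====
def Spec_cap_repetition (line : List String) (out : List String) : Prop := out = cap_repetition_alt line
instance (line : List String) (out : List String) : Decidable (Spec_cap_repetition line out) := by unfold Spec_cap_repetition; infer_instance

-- ===== CLAIM (what is proved, stated in full; the proofs are below) =====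
def Claim_equal_cap_repetition : Prop := ∀ (line : List String), Dom_cap_repetition line → Spec_cap_repetition line (cap_repetition line)

-- ===== LEMMAS AND PROOFS =====

-- A's loop without the output accumulator (prev, rep only), emitting directly.
def capRepF (p : Option String) (r : Int) : List String → List String
  | [] => []
  | i :: t =>
      if p ≠ some i then i :: capRepF (some i) 0 t
      else if r + 1 ≤ 2 then i :: capRepF (some i) (r + 1) t
      else capRepF (some i) (r + 1) t

theorem foldl_capRepStep (l : List String) :
    ∀ (p : Option String) (nl : List String) (r : Int),
      (l.foldl capRepStep (p, nl, r)).2.1 = nl ++ capRepF p r l := by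
  induction l with
  | nil => intro p nl r; simp [capRepF]
  | cons i t ih =>
      intro p nl r
      simp only [List.foldl_cons, capRepStep, capRepF]
      by_cases h : p = some i
      · simp only [h, ne_eq, not_true_eq_false, if_false]
        by_cases h2 : r + 1 ≤ 2 <;> simp [h2, ih]
      · simp [h, ih]

theorem capRepF_switch (l : List String) (x : String) (r : Int)
    (h : l.head? ≠ some x) : capRepF (some x) r l = capRepF none 0 l := by
  cases l with
  | nil => simp [capRepF]
  | cons y t =>
      have hyx : some x ≠ some y := by
        intro he; exact h (by simpa [List.head?] using he.symm)
      simp [capRepF, hyx]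

theorem capRepF_skip (m : Nat) (x : String) (rest : List String) (r : Int)
    (hr : 2 ≤ r) :
    capRepF (some x) r (List.replicate m x ++ rest) = capRepF (some x) (r + m) rest := by
  induction m generalizing r with
  | zero => simp
  | succ n ih =>
      have h2 : ¬ (r + 1 ≤ 2) := by omega
      simp only [List.replicate_succ, List.cons_append, capRepF, ne_eq,
        not_true_eq_false, if_false, h2]
      rw [ih (r + 1) (by omega)]
      congr 1
      omega

theorem capRepF_run (m : Nat) (x : String) (rest : List String)
    (h : rest.head? ≠ some x) :
    capRepF (some x) 0 (List.replicate m x ++ rest) =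
      List.replicate (min m 2) x ++ capRepF none 0 rest := by
  match m with
  | 0 => simpa using capRepF_switch rest x 0 h
  | 1 =>
      simp only [List.replicate_succ, List.replicate_zero, List.nil_append,
        List.cons_append, capRepF, ne_eq, not_true_eq_false, if_false]
      rw [if_pos (by omega : (0:Int) + 1 ≤ 2), capRepF_switch rest x (0+1) h]
      rfl
  | (n+2) =>
      simp only [List.replicate_succ, List.cons_append, capRepF, ne_eq,
        not_true_eq_false, if_false]
      rw [if_pos (by omega : (0:Int) + 1 ≤ 2), if_pos (by omega : (0:Int) + 1 + 1 ≤ 2)]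
      rw [capRepF_skip n x rest (0+1+1) (by omega), capRepF_switch rest x _ h]
      have h4 : min (n + 2) 2 = 2 := by omega
      rw [h4]
      simp [List.replicate_succ]

theorem takeWhile_beq_replicate (x : String) (xs : List String) :
    xs.takeWhile (· == x) = List.replicate (xs.takeWhile (· == x)).length x := by
  apply List.eq_replicate_of_mem
  intro y hy
  have := List.mem_takeWhile_imp hy
  exact eq_of_beq this

theorem head?_dropWhile_beq (x : String) (xs : List String) :
    (xs.dropWhile (· == x)).head? ≠ some x := by
  intro h
  have := List.head?_dropWhile_not (· == x) xs
  rw [h] at this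
  simp at this

theorem capRepF_eq_alt (l : List String) : capRepF none 0 l = cap_repetition_alt l := by
  induction hn : l.length using Nat.strong_induction_on generalizing l with
  | _ n ih =>
    cases l with
    | nil => simp [capRepF, cap_repetition_alt]
    | cons x xs =>
        have hdecomp : xs = List.replicate (xs.takeWhile (· == x)).length x ++
            xs.dropWhile (· == x) := by
          conv_lhs => rw [← List.takeWhile_append_dropWhile (p := (· == x)) (l := xs)]
          rw [← takeWhile_beq_replicate]
        have hlt : (xs.dropWhile (· == x)).length < n := by
          have := List.length_dropWhile_le (· == x) xs
          simp only [← hn, List.length_cons]; omega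
        have hrec := ih _ hlt (xs.dropWhile (· == x)) rfl
        rw [cap_repetition_alt]
        simp only [capRepF, ne_eq, reduceCtorEq, not_false_eq_true, if_true]
        conv_lhs => rw [hdecomp]
        rw [capRepF_run _ x _ (head?_dropWhile_beq x xs), hrec]
        have hmin : min ((xs.takeWhile (· == x)).length + 1) 3 =
            min (xs.takeWhile (· == x)).length 2 + 1 := by omega
        rw [hmin, List.replicate_succ, List.cons_append]

-- ===== VERDICT (by name: the statement is the Claim_ definition above) =====
theorem cap_repetition_spec : Claim_equal_cap_repetition := by
  intro line _
  unfold Spec_cap_repetition cap_repetition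
  rw [foldl_capRepStep, List.nil_append, capRepF_eq_alt]
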